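-- pv_equiv track=rewrite | github.com/pypi-data/pypi-mirror-241 | packages/benchling-wrapper/benchling_wrapper-0.5.1.tar.gz/benchling_wrapper-0.5.1/src/benchling_wrapper/benchling_wrapper.py | map_sample_type_to_preservation_method
-- ===== SOURCE A (Python) =====
-- def map_sample_type_to_preservation_method(sample_type: list[str]) -> list[str]:
--     """
--     Maps the sample type to the preservation method
--     :param sample_type:
--     """
--     specimen_type_mapping = {
--         "FFPE": ["FPB",
--                  "HE",
--                  "FPS",
--                  "FPR",
--                  "FPSC",
--                  "FPD"],
--
--         "FF": ["FFLI",
--                "FL",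
--                "FF",
--                "WB",
--                "PB",
--                "BC",
--                "S",
--                "F",
--                "R",
--                "D",
--                "PBL"]
--     }
--
--     sample_preservation_method = []
--     # now we should iteratively map the sample type to the preservation method according to specimen_type_mapping
--     # if the sample type is not found in the mapping, we will return the sample type as is
--     for sample in sample_type:
--         for preservation_method, sample_types in specimen_type_mapping.items():
--             if sample in sample_types:
--                 sample_preservation_method.append(preservation_method)
--                 break
--         else:
--             sample_preservation_method.append(sample)
--
--     return sample_preservation_method
-- ===== SOURCE B (Python) =====
-- def map_sample_type_to_preservation_method(sample_type: list[str]) -> list[str]: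
--     """
--     Maps the sample type to the preservation method
--     :param sample_type:
--     """
--     specimen_type_mapping = {
--         "FFPE": ["FPB", "HE", "FPS", "FPR", "FPSC", "FPD"],
--         "FF": ["FFLI", "FL", "FF", "WB", "PB", "BC", "S", "F", "R", "D", "PBL"],
--     }
--     reverse = {s: method for method, types in specimen_type_mapping.items() for s in types}
--     return [reverse.get(s, s) for s in sample_type]
-- ===== Notes on version B (the rewrite author's own statement) =====
-- stated objective: idiomatic
-- what changed: Replaced the per-element inner scan over the mapping's value lists (with a for-else fallback) by one precomputed reverse dictionary sample-type -> method and a single flat lookup pass with reverse.get(s, s).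
import Mathlib
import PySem

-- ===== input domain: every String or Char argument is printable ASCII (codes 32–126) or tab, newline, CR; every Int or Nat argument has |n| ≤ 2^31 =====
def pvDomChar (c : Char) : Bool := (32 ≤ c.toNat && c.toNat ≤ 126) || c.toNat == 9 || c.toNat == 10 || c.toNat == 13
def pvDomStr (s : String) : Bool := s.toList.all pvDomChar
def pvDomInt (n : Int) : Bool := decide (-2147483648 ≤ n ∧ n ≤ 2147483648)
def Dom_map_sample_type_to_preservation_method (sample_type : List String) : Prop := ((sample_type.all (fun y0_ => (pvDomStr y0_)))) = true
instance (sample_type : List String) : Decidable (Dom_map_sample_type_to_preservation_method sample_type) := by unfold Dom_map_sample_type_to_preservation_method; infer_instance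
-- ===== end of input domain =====

-- B replaces A's per-element inner scan over the mapping's value lists (with a for-else
-- fallback) by one precomputed reverse dictionary and a single flat lookup pass (idiomatic).

-- ===== PORT A =====
-- the dict literal specimen_type_mapping, as an insertion-ordered association dict
def pvMapping : PySem.Dict String (List String) :=
  PySem.Dict.ofList
    [("FFPE", ["FPB", "HE", "FPS", "FPR", "FPSC", "FPD"]),
     ("FF",   ["FFLI", "FL", "FF", "WB", "PB", "BC", "S", "F", "R", "D", "PBL"])]

-- the inner 'for preservation_method, sample_types in ….items(): if sample in …: break / else:' loop
def pvInner : List (String × List String) → String → String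
  | [], sample => sample
  | (m, ts) :: rest, sample => if ts.contains sample then m else pvInner rest sample

def map_sample_type_to_preservation_method (sample_type : List String) : List String :=
  sample_type.foldl (fun acc sample => acc ++ [pvInner pvMapping.items sample]) []

-- ===== PORT B =====
-- reverse = {s: method for method, types in specimen_type_mapping.items() for s in types}
def pvReverse : PySem.Dict String String :=
  pvMapping.items.foldl
    (fun d p => p.2.foldl (fun d s => d.insert s p.1) d) PySem.Dict.empty

-- [reverse.get(s, s) for s in sample_type]
def map_sample_type_to_preservation_method_alt (sample_type : List String) : List String :=
  sample_type.map (fun s => pvReverse.getD s s)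

-- ===== PRECONDITION & SPEC =====
def Spec_map_sample_type_to_preservation_method (sample_type : List String) (out : List String) : Prop := out = map_sample_type_to_preservation_method_alt sample_type
instance (sample_type : List String) (out : List String) : Decidable (Spec_map_sample_type_to_preservation_method sample_type out) := by unfold Spec_map_sample_type_to_preservation_method; infer_instance

-- ===== CLAIM (what is proved, stated in full; the proofs are below) =====
def Claim_equal_map_sample_type_to_preservation_method : Prop := ∀ (sample_type : List String), Dom_map_sample_type_to_preservation_method sample_type → Spec_map_sample_type_to_preservation_method sample_type (map_sample_type_to_preservation_method sample_type)

-- ===== LEMMAS AND PROOFS =====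
-- per-element agreement: A's inner scan over the mapping equals B's reverse-dictionary lookup
set_option maxHeartbeats 1000000 in
theorem pv_step (s : String) : pvInner pvMapping.items s = pvReverse.getD s s := by
  by_cases h0 : s = "FPB"
  · subst h0; decide
  by_cases h1 : s = "HE"
  · subst h1; decide
  by_cases h2 : s = "FPS"
  · subst h2; decide
  by_cases h3 : s = "FPR"
  · subst h3; decide
  by_cases h4 : s = "FPSC"
  · subst h4; decide
  by_cases h5 : s = "FPD"
  · subst h5; decide
  by_cases h6 : s = "FFLI"
  · subst h6; decide
  by_cases h7 : s = "FL"
  · subst h7; decide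
  by_cases h8 : s = "FF"
  · subst h8; decide
  by_cases h9 : s = "WB"
  · subst h9; decide
  by_cases h10 : s = "PB"
  · subst h10; decide
  by_cases h11 : s = "BC"
  · subst h11; decide
  by_cases h12 : s = "S"
  · subst h12; decide
  by_cases h13 : s = "F"
  · subst h13; decide
  by_cases h14 : s = "R"
  · subst h14; decide
  by_cases h15 : s = "D"
  · subst h15; decide
  by_cases h16 : s = "PBL"
  · subst h16; decide
  simp [pvInner, pvMapping, pvReverse, PySem.Dict.ofList, PySem.Dict.update,
    PySem.Dict.insert, PySem.Dict.empty, PySem.Dict.getD, PySem.Dict.get?,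
    List.find?, h0, h1, h2, h3, h4, h5, h6, h7, h8, h9, h10, h11, h12, h13, h14, h15, h16,
    beq_eq_false_iff_ne.mpr (Ne.symm h0),
    beq_eq_false_iff_ne.mpr (Ne.symm h1),
    beq_eq_false_iff_ne.mpr (Ne.symm h2),
    beq_eq_false_iff_ne.mpr (Ne.symm h3),
    beq_eq_false_iff_ne.mpr (Ne.symm h4),
    beq_eq_false_iff_ne.mpr (Ne.symm h5),
    beq_eq_false_iff_ne.mpr (Ne.symm h6),
    beq_eq_false_iff_ne.mpr (Ne.symm h7),
    beq_eq_false_iff_ne.mpr (Ne.symm h8),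
    beq_eq_false_iff_ne.mpr (Ne.symm h9),
    beq_eq_false_iff_ne.mpr (Ne.symm h10),
    beq_eq_false_iff_ne.mpr (Ne.symm h11),
    beq_eq_false_iff_ne.mpr (Ne.symm h12),
    beq_eq_false_iff_ne.mpr (Ne.symm h13),
    beq_eq_false_iff_ne.mpr (Ne.symm h14),
    beq_eq_false_iff_ne.mpr (Ne.symm h15),
    beq_eq_false_iff_ne.mpr (Ne.symm h16)]

-- ===== VERDICT (by name: the statement is the Claim_ definition above) =====
theorem map_sample_type_to_preservation_method_spec : Claim_equal_map_sample_type_to_preservation_method := by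
  intro st _
  unfold Spec_map_sample_type_to_preservation_method
  unfold map_sample_type_to_preservation_method map_sample_type_to_preservation_method_alt
  rw [PySem.List.foldl_append_singleton_eq_map]
  exact List.map_congr_left (fun s _ => pv_step s)
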